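-- pv_equiv track=rewrite | github.com/ArtinZer0/Voice-Asistant | gui_speech_recognition.py | foo
-- ===== SOURCE A (Python) =====
-- def foo(text):
--     try:
--         x = text.split()
--         n = 0
--         a = None
--         for i in x:
--             if i=='and':
--                 n+=1
--             if i.isdigit() and n==0:
--                 a=int(i)
--         return a
--     except:
--         pass
-- ===== SOURCE B (Python) =====
-- def foo(text):
--     try:
--         words = text.split()
--         prefix = words[:words.index('and')] if 'and' in words else words
--         for w in reversed(prefix):
--             if w.isdigit():
--                 return int(w)
--         return None
--     except:
--         return None
-- ===== Notes on version B (the rewrite author's own statement) =====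
-- stated objective: simpler
-- what changed: B computes the boundary (words before the first 'and') first and then does a reversed early-return search for the first digit token, instead of A's forward pass that maintains an 'and'-counter and overwrites an accumulator.
import Mathlib
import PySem

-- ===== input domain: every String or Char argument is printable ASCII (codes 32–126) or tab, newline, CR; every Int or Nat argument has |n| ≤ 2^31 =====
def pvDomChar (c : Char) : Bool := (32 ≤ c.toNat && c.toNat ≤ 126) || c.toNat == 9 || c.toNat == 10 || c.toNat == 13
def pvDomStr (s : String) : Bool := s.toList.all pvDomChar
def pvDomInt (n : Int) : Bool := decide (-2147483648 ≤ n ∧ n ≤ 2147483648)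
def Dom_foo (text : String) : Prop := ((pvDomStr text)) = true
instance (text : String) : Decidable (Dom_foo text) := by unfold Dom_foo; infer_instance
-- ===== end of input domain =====

-- B computes the prefix of words before the first 'and' and searches it backwards for the first digit token, instead of A's forward counting pass; return values agree everywhere.

-- ===== PORT A =====
-- one loop iteration of A: n counts 'and' tokens seen so far, a holds the last digit token read while n == 0
def fooStep (st : Int × Option Int) (i : String) : Int × Option Int :=
  let n := if i == "and" then st.1 + 1 else st.1
  let a := if PySem.Str.strIsdigit i && (n == 0) then PySem.Int.ofStr? i else st.2
  (n, a)

def foo (text : String) : Option Int :=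
  ((PySem.Str.split₀ text).foldl fooStep (0, none)).2

-- ===== PORT B =====
-- words[:words.index('and')] if 'and' in words else words
def fooPrefix (words : List String) : List String :=
  match PySem.List.index? words "and" with
  | some j => words.take j
  | none   => words

def foo_alt (text : String) : Option Int :=
  match (fooPrefix (PySem.Str.split₀ text)).reverse.find? (fun w => PySem.Str.strIsdigit w) with
  | some w => PySem.Int.ofStr? w
  | none   => none

-- ===== PRECONDITION & SPEC =====
def Spec_foo (text : String) (out : Option Int) : Prop := out = foo_alt text
instance (text : String) (out : Option Int) : Decidable (Spec_foo text out) := by unfold Spec_foo; infer_instance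

-- ===== CLAIM (what is proved, stated in full; the proofs are below) =====
def Claim_equal_foo : Prop := ∀ (text : String), Dom_foo text → Spec_foo text (foo text)

-- ===== LEMMAS AND PROOFS =====

-- once an 'and' has been seen (n > 0), A's accumulator a never changes again
theorem fold_pos (l : List String) (n : Int) (a : Option Int) (h : 0 < n) :
    (l.foldl fooStep (n, a)).2 = a := by
  induction l generalizing n a with
  | nil => rfl
  | cons i t ih =>
      simp only [List.foldl_cons, fooStep]
      have h1 : (0:Int) < (if i == "and" then n + 1 else n) := by
        by_cases hc : (i == "and") = true <;> simp [hc] <;> omega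
      have h2 : ((if i == "and" then n + 1 else n) == 0) = false := by
        simp only [beq_eq_false_iff_ne]; omega
      rw [h2]
      simp only [Bool.and_false, Bool.false_eq_true, if_false]
      exact ih _ _ h1

-- B's prefix equals takeWhile (· ≠ "and")
theorem fooPrefix_eq_takeWhile (l : List String) :
    fooPrefix l = l.takeWhile (fun w => !(w == "and")) := by
  induction l with
  | nil => rfl
  | cons x t ih =>
      unfold fooPrefix at ih ⊢
      by_cases hx : x = "and"
      · subst hx
        rw [PySem.List.index?_cons_self]
        have hb : (("and" : String) == "and") = true := beq_self_eq_true _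
        rw [List.takeWhile_cons_of_neg (by rw [Bool.not_eq_true, Bool.not_eq_false']; exact hb)]
        rfl
      · rw [PySem.List.index?_cons_of_ne t hx]
        have hbx : (x == "and") = false := beq_eq_false_iff_ne.mpr hx
        rw [List.takeWhile_cons_of_pos (by rw [hbx]; rfl)]
        cases h : PySem.List.index? t "and" with
        | none =>
            rw [h] at ih
            exact congrArg (x :: ·) ih
        | some j =>
            rw [h] at ih
            exact congrArg (x :: ·) ih

-- A's fold from n = 0 is B's reversed search over the takeWhile prefix, seeded with a
theorem fold_zero (l : List String) (a : Option Int) :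
    (l.foldl fooStep (0, a)).2 =
      match ((l.takeWhile (fun w => !(w == "and"))).reverse.find?
              (fun w => PySem.Str.strIsdigit w)) with
      | some w => PySem.Int.ofStr? w
      | none   => a := by
  induction l generalizing a with
  | nil => rfl
  | cons i t ih =>
      by_cases hi : i = "and"
      · subst hi
        have hd : PySem.Str.strIsdigit "and" = false := by decide
        simp only [List.foldl_cons, fooStep, BEq.rfl, if_true, hd, Bool.false_and,
          Bool.false_eq_true, if_false, List.takeWhile_cons, Bool.not_true]
        rw [fold_pos t (0+1) a (by omega)]
        simp
      · have hne : (i == "and") = false := by simp [hi]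
        simp only [List.foldl_cons, fooStep, hne, Bool.false_eq_true, if_false,
          List.takeWhile_cons, Bool.not_false, if_true, List.reverse_cons,
          BEq.rfl, Bool.and_true]
        rw [List.find?_append]
        by_cases hd : PySem.Str.strIsdigit i = true
        · simp only [hd, if_true]
          rw [ih (PySem.Int.ofStr? i)]
          cases hf : (List.takeWhile (fun w => !(w == "and")) t).reverse.find?
              (fun w => PySem.Str.strIsdigit w) with
          | some w => simp
          | none =>
              rw [PySem.Str.strIsdigit_eq] at hd
              simp [hd]
        · have hd' : PySem.Str.strIsdigit i = false := by simpa using hd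
          simp only [hd', Bool.false_eq_true, if_false]
          rw [ih a]
          cases hf : (List.takeWhile (fun w => !(w == "and")) t).reverse.find?
              (fun w => PySem.Str.strIsdigit w) with
          | some w => simp
          | none =>
              rw [PySem.Str.strIsdigit_eq] at hd'
              simp [hd']

-- ===== VERDICT (by name: the statement is the Claim_ definition above) =====
theorem foo_spec : Claim_equal_foo := by
  intro text _
  unfold Spec_foo foo foo_alt
  rw [fooPrefix_eq_takeWhile, fold_zero]
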